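-- pv_equiv track=rewrite | github.com/hackingmath/puzzles | weekend_puzzle_093019.py | block_repeat
-- ===== SOURCE A (Python) =====
-- def block_repeat(board, n):
--     """REturns True if there's a repeat in 3x3 block n"""
--     this_block = []
--     row_start = 3 * (n // 4)
--     col_start = 3 * (n % 4)
--     for r in range(3):
--         this_row = board[(12 * (row_start + r) + col_start):(12 * (row_start + r) + col_start + 3)]
--         for x in this_row:
--             this_block.append(x)
--     # println(n)
--     # println(this_block)
--     for letter in 'abcdef':
--         if this_block.count(letter) > 1:
--             # println(this_block)
--             return True
--     return False
-- ===== SOURCE B (Python) =====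
-- LETTERS = frozenset('abcdef')
--
--
-- def block_repeat(board, n):
--     """True iff some letter a-f appears more than once in 3x3 block n.
--
--     One pass over the block cells with a seen-set instead of six
--     repeated list .count scans."""
--     row_start = 3 * (n // 4)
--     col_start = 3 * (n % 4)
--     seen = set()
--     for r in range(3):
--         start = 12 * (row_start + r) + col_start
--         for cell in board[start:start + 3]:
--             if cell in LETTERS:
--                 if cell in seen:
--                     return True
--                 seen.add(cell)
--     return False
-- ===== Notes on version B (the rewrite author's own statement) =====
-- stated objective: simpler
-- what changed: Replaces the six repeated this_block.count(letter) scans (and the intermediate block list) with a single pass over the block cells that keeps a seen-set of letters and returns True on the first repeat.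
import Mathlib
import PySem

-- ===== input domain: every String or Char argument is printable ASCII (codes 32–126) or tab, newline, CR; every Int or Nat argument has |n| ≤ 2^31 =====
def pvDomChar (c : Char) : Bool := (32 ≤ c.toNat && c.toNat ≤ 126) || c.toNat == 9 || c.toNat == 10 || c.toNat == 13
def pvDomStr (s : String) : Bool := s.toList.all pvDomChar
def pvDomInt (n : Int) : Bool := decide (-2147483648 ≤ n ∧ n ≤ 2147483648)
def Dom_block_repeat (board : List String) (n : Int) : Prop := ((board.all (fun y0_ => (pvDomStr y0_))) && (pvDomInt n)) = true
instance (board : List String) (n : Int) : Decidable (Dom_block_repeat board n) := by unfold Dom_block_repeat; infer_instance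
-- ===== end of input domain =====

-- B replaces A's six repeated this_block.count(letter) scans with a single pass
-- over the block cells maintaining a seen-set of letters (objective: simpler).


-- ===== PORT A =====
-- for letter in 'abcdef': if this_block.count(letter) > 1: return True / return False
def checkLetters (letters : List String) (blk : List String) : Bool :=
  match letters with
  | [] => false
  | l :: rest => if 1 < blk.count l then true else checkLetters rest blk

def block_repeat (board : List String) (n : Int) : Bool :=
  let row_start := 3 * PySem.Int.floordiv n 4
  let col_start := 3 * PySem.Int.mod n 4
  let this_block := (PySem.List.pyRange 0 3 1).foldl (fun acc r =>
    let this_row := PySem.List.slice board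
      (some (12 * (row_start + r) + col_start))
      (some (12 * (row_start + r) + col_start + 3))
    this_row.foldl (fun a x => a ++ [x]) acc) []
  checkLetters ["a", "b", "c", "d", "e", "f"] this_block

-- ===== PORT B =====
-- LETTERS = frozenset('abcdef')
def pvLetterSet : PySem.Set String := PySem.Set.ofList ["a", "b", "c", "d", "e", "f"]

-- inner loop: for cell in board[start:start+3]: … ; `none` = the early `return True`
def scanCells (cells : List String) (seen : PySem.Set String) : Option (PySem.Set String) :=
  match cells with
  | [] => some seen
  | c :: rest =>
    if PySem.Set.contains pvLetterSet c then
      if PySem.Set.contains seen c then none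
      else scanCells rest (PySem.Set.add seen c)
    else scanCells rest seen

-- outer loop: for r in range(3): …, threading the seen-set
def scanRows (board : List String) (row_start col_start : Int)
    (rows : List Int) (seen : PySem.Set String) : Bool :=
  match rows with
  | [] => false
  | r :: rest =>
    match scanCells (PySem.List.slice board
        (some (12 * (row_start + r) + col_start))
        (some (12 * (row_start + r) + col_start + 3))) seen with
    | none => true
    | some seen' => scanRows board row_start col_start rest seen'

def block_repeat_alt (board : List String) (n : Int) : Bool :=
  scanRows board (3 * PySem.Int.floordiv n 4) (3 * PySem.Int.mod n 4)
    (PySem.List.pyRange 0 3 1) PySem.Set.empty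

-- ===== PRECONDITION & SPEC =====
def Spec_block_repeat (board : List String) (n : Int) (out : Bool) : Prop := out = block_repeat_alt board n
instance (board : List String) (n : Int) (out : Bool) : Decidable (Spec_block_repeat board n out) := by unfold Spec_block_repeat; infer_instance

-- ===== CLAIM (what is proved, stated in full; the proofs are below) =====
def Claim_equal_block_repeat : Prop := ∀ (board : List String) (n : Int), Dom_block_repeat board n → Spec_block_repeat board n (block_repeat board n)

-- ===== LEMMAS AND PROOFS =====

-- proof-side name for the letter list both ports spell out literally
def pvLetters : List String := ["a", "b", "c", "d", "e", "f"]

lemma checkLetters_iff (ls blk : List String) :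
    checkLetters ls blk = true ↔ ∃ l ∈ ls, 1 < blk.count l := by
  induction ls with
  | nil => simp [checkLetters]
  | cons l rest ih =>
    by_cases h : 1 < blk.count l
    · simp [checkLetters, h]
    · simp [checkLetters, h, ih]

lemma scanCells_append (xs ys : List String) (seen : PySem.Set String) :
    scanCells (xs ++ ys) seen =
      match scanCells xs seen with
      | none => none
      | some s => scanCells ys s := by
  induction xs generalizing seen with
  | nil => simp [scanCells]
  | cons c rest ih =>
    by_cases h1 : c ∈ pvLetterSet
    · by_cases h2 : c ∈ seen
      · simp [scanCells, h1, h2]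
      · simp [scanCells, h1, h2, ih]
    · simp [scanCells, h1, ih]

lemma mem_letterSet (c : String) : c ∈ pvLetterSet ↔ c ∈ pvLetters := by
  rw [pvLetterSet, PySem.Set.mem_ofList, pvLetters]

lemma scanCells_isNone_iff (xs : List String) (seen : PySem.Set String) :
    (scanCells xs seen).isNone = true ↔
      ∃ l ∈ pvLetters, (l ∈ seen ∧ l ∈ xs) ∨ 2 ≤ xs.count l := by
  induction xs generalizing seen with
  | nil => simp [scanCells]
  | cons c rest ih =>
    by_cases h1 : c ∈ pvLetterSet
    · have hcL : c ∈ pvLetters := (mem_letterSet c).mp h1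
      by_cases h2 : c ∈ seen
      · simp only [scanCells, PySem.Set.contains_iff, h1, h2, if_true, Option.isNone_none]
        exact iff_of_true trivial ⟨c, hcL, Or.inl ⟨h2, List.mem_cons_self⟩⟩
      · simp only [scanCells, PySem.Set.contains_iff, h1, h2, if_true, if_false]
        rw [ih]
        apply exists_congr; intro l
        apply and_congr_right; intro _
        by_cases hlc : l = c
        · subst hlc
          constructor
          · rintro (⟨_, hm⟩ | hcnt)
            · have := List.count_pos_iff.mpr hm
              right; rw [List.count_cons_self]; omega
            · right; rw [List.count_cons_self]; omega
          · rintro (⟨hs, _⟩ | hcnt)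
            · exact absurd hs h2
            · rw [List.count_cons_self] at hcnt
              have hm : l ∈ rest := List.count_pos_iff.mp (by omega)
              exact Or.inl ⟨(PySem.Set.mem_add seen l l).mpr (Or.inr rfl), hm⟩
        · have hcl : ¬ c = l := fun h => hlc h.symm
          simp [PySem.Set.mem_add, hlc, hcl, List.mem_cons]
    · have hcL : c ∉ pvLetters := fun h => h1 ((mem_letterSet c).mpr h)
      simp only [scanCells, PySem.Set.contains_iff, h1, if_false]
      rw [ih]
      apply exists_congr; intro l
      apply and_congr_right; intro hl
      have hlc : l ≠ c := fun h => hcL (h ▸ hl)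
      have hcl : ¬ c = l := fun h => hlc h.symm
      simp [hlc, hcl, List.mem_cons]

lemma checkLetters_eq_scan (blk : List String) :
    checkLetters pvLetters blk = (scanCells blk PySem.Set.empty).isNone := by
  rw [Bool.eq_iff_iff, checkLetters_iff, scanCells_isNone_iff]
  apply exists_congr; intro l
  constructor
  · rintro ⟨hl, hc⟩; exact ⟨hl, Or.inr (by omega)⟩
  · rintro ⟨hl, (⟨hs, _⟩ | hc)⟩
    · cases hs
    · exact ⟨hl, by omega⟩

lemma foldl_app (acc row : List String) :
    row.foldl (fun a x => a ++ [x]) acc = acc ++ row := by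
  induction row generalizing acc with
  | nil => simp
  | cons x rest ih => simp [List.foldl, ih]

lemma scanRows_eq (board : List String) (rs cs : Int) (rows : List Int)
    (seen : PySem.Set String) :
    scanRows board rs cs rows seen =
      (scanCells (rows.flatMap (fun r => PySem.List.slice board
        (some (12 * (rs + r) + cs)) (some (12 * (rs + r) + cs + 3)))) seen).isNone := by
  induction rows generalizing seen with
  | nil => simp [scanRows, scanCells]
  | cons r rest ih =>
    simp only [scanRows, List.flatMap_cons, scanCells_append]
    cases h : scanCells (PySem.List.slice board
        (some (12 * (rs + r) + cs)) (some (12 * (rs + r) + cs + 3))) seen with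
    | none => rfl
    | some s => exact ih s


theorem block_repeat_spec : Claim_equal_block_repeat := by
  intro board n _
  show block_repeat board n = block_repeat_alt board n
  unfold block_repeat block_repeat_alt
  rw [show PySem.List.pyRange 0 3 1 = [0, 1, 2] from by decide]
  rw [scanRows_eq]
  rw [show (["a", "b", "c", "d", "e", "f"] : List String) = pvLetters from rfl]
  simp only [List.foldl, foldl_app, List.nil_append, List.flatMap_cons, List.flatMap_nil,
    List.append_nil, List.append_assoc, checkLetters_eq_scan]
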